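-- pv_equiv track=rewrite | github.com/dianachu0209/CMSC141 | 141 HWs/hw4.py | how_many_fit
-- ===== SOURCE A (Python) =====
-- def how_many_fit(group_sizes, num_seats):
--     """
--     Determines how many groups can fit in a bus according to group sizes and
--     the number of seats on the bus.
--
--     Inputs:
--         group_sizes [list[int]]: sizes of the groups
--         num_seats [int]: number of seats on the bus
--
--     Returns [int]: the number of groups that fit on the bus
--     """
--
--     groups_fit = 0
--     for group in group_sizes:
--         if num_seats - group >= 0:
--             num_seats = num_seats - group
--             groups_fit += 1
--         elif num_seats - group < 0:
--             return groups_fit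
--     return groups_fit
-- ===== SOURCE B (Python) =====
-- def how_many_fit(group_sizes, num_seats):
--     # Build the prefix-sum table, then return the index of the first
--     # prefix sum that exceeds num_seats (len(prefix) if none does).
--     prefix = []
--     total = 0
--     for g in group_sizes:
--         total += g
--         prefix.append(total)
--     for i, s in enumerate(prefix):
--         if s > num_seats:
--             return i
--     return len(prefix)
-- ===== Notes on version B (the rewrite author's own statement) =====
-- stated objective: alternative
-- what changed: Replaces the in-place greedy seat-subtraction loop with an explicit prefix-sum table followed by a find-first-exceeding scan.
import Mathlib
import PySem

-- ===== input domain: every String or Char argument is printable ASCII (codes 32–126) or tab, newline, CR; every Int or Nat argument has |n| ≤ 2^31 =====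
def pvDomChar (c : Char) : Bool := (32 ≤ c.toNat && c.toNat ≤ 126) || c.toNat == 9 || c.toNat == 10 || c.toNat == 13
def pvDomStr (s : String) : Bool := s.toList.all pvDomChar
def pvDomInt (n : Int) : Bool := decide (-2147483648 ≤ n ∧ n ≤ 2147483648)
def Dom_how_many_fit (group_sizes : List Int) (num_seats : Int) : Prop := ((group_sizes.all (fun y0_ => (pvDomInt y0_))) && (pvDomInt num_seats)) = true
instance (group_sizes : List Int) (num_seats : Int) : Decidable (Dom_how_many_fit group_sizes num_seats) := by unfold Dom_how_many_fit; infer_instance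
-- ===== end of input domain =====

-- B replaces A's greedy in-place seat subtraction with a prefix-sum table plus a
-- find-first-exceeding scan (alternative decomposition, same cost).


-- ===== PORT A =====
-- loop state: remaining seats, groups_fit accumulator; early return on the elif branch
def howManyFitLoop : List Int → Int → Int → Int
  | [], _, groups_fit => groups_fit
  | g :: rest, seats, groups_fit =>
    if seats - g ≥ 0 then howManyFitLoop rest (seats - g) (groups_fit + 1)
    else if seats - g < 0 then groups_fit
    else howManyFitLoop rest seats groups_fit

def how_many_fit (group_sizes : List Int) (num_seats : Int) : Int :=
  howManyFitLoop group_sizes num_seats 0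

-- ===== PORT B =====
-- first pass of Source B: builds the prefix-sum list (carrying the running total)
def buildPrefix : List Int → Int → List Int
  | [], _ => []
  | g :: rest, total => (total + g) :: buildPrefix rest (total + g)

-- second pass of Source B: first index whose prefix sum exceeds num_seats, else the length
def findFirstExceed : List Int → Int → Int → Int
  | [], _, i => i
  | s :: rest, seats, i => if s > seats then i else findFirstExceed rest seats (i + 1)

def how_many_fit_alt (group_sizes : List Int) (num_seats : Int) : Int :=
  findFirstExceed (buildPrefix group_sizes 0) num_seats 0

-- ===== PRECONDITION & SPEC =====
def Spec_how_many_fit (group_sizes : List Int) (num_seats : Int) (out : Int) : Prop := out = how_many_fit_alt group_sizes num_seats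
instance (group_sizes : List Int) (num_seats : Int) (out : Int) : Decidable (Spec_how_many_fit group_sizes num_seats out) := by unfold Spec_how_many_fit; infer_instance

-- ===== CLAIM (what is proved, stated in full; the proofs are below) =====
def Claim_equal_how_many_fit : Prop := ∀ (group_sizes : List Int) (num_seats : Int), Dom_how_many_fit group_sizes num_seats → Spec_how_many_fit group_sizes num_seats (how_many_fit group_sizes num_seats)

-- ===== LEMMAS AND PROOFS =====

-- invariant: A's loop with `seats` remaining equals B's scan over prefix sums shifted by t,
-- compared against t + seats
theorem howManyFitLoop_eq_find (gs : List Int) :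
    ∀ (t seats acc : Int),
      howManyFitLoop gs seats acc = findFirstExceed (buildPrefix gs t) (t + seats) acc := by
  induction gs with
  | nil => intro t seats acc; simp [howManyFitLoop, buildPrefix, findFirstExceed]
  | cons g rest ih =>
    intro t seats acc
    simp only [howManyFitLoop, buildPrefix, findFirstExceed]
    by_cases h : seats - g ≥ 0
    · have hc : ¬ (t + g > t + seats) := by omega
      simp only [if_pos h, if_neg hc]
      have := ih (t + g) (seats - g) (acc + 1)
      rw [this]; congr 1; omega
    · have hc : t + g > t + seats := by omega
      simp only [if_neg h, if_pos (by omega : seats - g < 0), if_pos hc]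

-- ===== VERDICT (by name: the statement is the Claim_ definition above) =====
theorem how_many_fit_spec : Claim_equal_how_many_fit := by
  intro gs n _
  unfold Spec_how_many_fit how_many_fit how_many_fit_alt
  have := howManyFitLoop_eq_find gs 0 n 0
  rw [this]; congr 1; omega
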